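-- pv_equiv track=rewrite | github.com/lasersphere/Tilda | PolliFit/source/AliveTools.py | find_ref_files
-- ===== SOURCE A (Python) =====
-- def find_ref_files(file,all_Files):
--     """
--     this will search for the previous and the next reference measurement for a given HV measurement file.
--     :param file: HV measurement file, all_Files: dictionary of all files
--     :return: ref_Files
--     """
--     i=0
--     j=0
--     ref_Files=[]
--     for element in all_Files:
--         if element == file:
--             i=1
--
--         if 'ref' in element['type']:
--             if i==0:
--                 ref_Files = [element]
--             if i==1:
--                 if j==0:
--                     ref_Files = ref_Files+[element]
--                     j=1
--
--     return (ref_Files)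
-- ===== SOURCE B (Python) =====
-- def find_ref_files(file, all_Files):
--     # locate the first occurrence of `file`; if absent the split point is len(all_Files)
--     pos = len(all_Files)
--     for idx, element in enumerate(all_Files):
--         if element == file:
--             pos = idx
--             break
--     before = [e for e in all_Files[:pos] if 'ref' in e['type']]
--     after = [e for e in all_Files[pos:] if 'ref' in e['type']]
--     result = [before[-1]] if before else []
--     if after:
--         result.append(after[0])
--     return result
-- ===== Notes on version B (the rewrite author's own statement) =====
-- stated objective: alternative
-- what changed: Replaces the single flag-driven (i/j state machine) pass with locate-the-split-point then two filtered passes, returning the last ref before the file's position and the first ref from it on; Pre_ only excludes inputs where some element lacks the 'type' key, on which A raises KeyError (so does B).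
import Mathlib
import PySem

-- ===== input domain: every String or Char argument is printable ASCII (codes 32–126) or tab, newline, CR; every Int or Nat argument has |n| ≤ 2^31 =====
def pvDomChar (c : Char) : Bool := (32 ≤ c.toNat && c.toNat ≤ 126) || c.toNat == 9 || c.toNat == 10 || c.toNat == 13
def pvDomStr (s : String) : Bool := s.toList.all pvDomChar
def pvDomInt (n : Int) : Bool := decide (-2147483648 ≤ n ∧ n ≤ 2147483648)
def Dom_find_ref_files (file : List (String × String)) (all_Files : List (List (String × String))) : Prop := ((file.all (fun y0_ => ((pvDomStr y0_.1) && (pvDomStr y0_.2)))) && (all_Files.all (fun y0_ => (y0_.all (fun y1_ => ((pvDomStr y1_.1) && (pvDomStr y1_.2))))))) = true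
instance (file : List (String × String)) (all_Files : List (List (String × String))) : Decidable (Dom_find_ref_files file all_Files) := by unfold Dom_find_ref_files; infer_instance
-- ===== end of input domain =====

-- B replaces A's flag-driven single pass by split-point location plus two filtered passes (objective: alternative; same behaviour, same cost).

-- Shared Python-semantics shims (not algorithm code):
-- Python's dict equality `element == file` ignores insertion order: same key set (first occurrence
-- of each key under the assoc-list convention) with equal first-match values.
def pyDictEq (d e : List (String × String)) : Bool :=
  let dk := PySem.List.dedup (d.map Prod.fst)
  let ek := PySem.List.dedup (e.map Prod.fst)
  (dk.length == ek.length) &&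
    dk.all (fun k => (PySem.Dict.mk d).get? k == (PySem.Dict.mk e).get? k)

-- `'ref' in element['type']` — total form of the KeyError-raising lookup (Pre_ excludes the KeyError inputs).
def pyIsRef (e : List (String × String)) : Bool :=
  PySem.Str.isIn "ref" ((PySem.Dict.mk e).getD "type" "")

-- ===== PORT A =====
-- the loop body of A, state (i, j, ref_Files)
def stepA (file : List (String × String))
    (st : Int × Int × List (List (String × String))) (element : List (String × String)) :
    Int × Int × List (List (String × String)) :=
  let i : Int := if pyDictEq element file then 1 else st.1
  let j : Int := st.2.1
  let refs := st.2.2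
  if pyIsRef element then
    let refs := if i == 0 then [element] else refs
    if i == 1 then
      if j == 0 then (i, 1, refs ++ [element]) else (i, j, refs)
    else (i, j, refs)
  else (i, j, refs)

def find_ref_files (file : List (String × String)) (all_Files : List (List (String × String))) : List (List (String × String)) :=
  (all_Files.foldl (stepA file) (0, 0, [])).2.2

-- ===== PORT B =====
-- index of the first element equal to `file`, or the length if absent (the for/break scan of Source B)
def findPos (file : List (String × String)) : List (List (String × String)) → Nat
  | [] => 0
  | e :: rest => if pyDictEq e file then 0 else findPos file rest + 1

def find_ref_files_alt (file : List (String × String)) (all_Files : List (List (String × String))) : List (List (String × String)) :=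
  let pos := findPos file all_Files
  let before := (all_Files.take pos).filter pyIsRef
  let after := (all_Files.drop pos).filter pyIsRef
  let result := match before.getLast? with | some x => [x] | none => []
  match after with
  | a :: _ => result ++ [a]
  | [] => result

-- ===== PRECONDITION & SPEC =====
-- Pre_ excludes exactly the inputs on which Python A raises KeyError: some element without a 'type' key.
def Pre_find_ref_files (file : List (String × String)) (all_Files : List (List (String × String))) : Prop :=
  ∀ e ∈ all_Files, "type" ∈ e.map Prod.fst
instance (file : List (String × String)) (all_Files : List (List (String × String))) : Decidable (Pre_find_ref_files file all_Files) := by unfold Pre_find_ref_files; infer_instance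

def pvWitness_find_ref_files : (List (String × String)) × (List (List (String × String))) :=
  ([("type", "hv"), ("n", "3")],
   [[("type", "ref"), ("n", "1")], [("type", "hv"), ("n", "3")], [("type", "a ref")], [("type", "ref2")]])

def Spec_find_ref_files (file : List (String × String)) (all_Files : List (List (String × String))) (out : List (List (String × String))) : Prop := out = find_ref_files_alt file all_Files
instance (file : List (String × String)) (all_Files : List (List (String × String))) (out : List (List (String × String))) : Decidable (Spec_find_ref_files file all_Files out) := by unfold Spec_find_ref_files; infer_instance

-- ===== CLAIM (what is proved, stated in full; the proofs are below) =====
def Claim_equal_find_ref_files : Prop := ∀ (file : List (String × String)) (all_Files : List (List (String × String))), Dom_find_ref_files file all_Files → Pre_find_ref_files file all_Files → Spec_find_ref_files file all_Files (find_ref_files file all_Files)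

-- ===== LEMMAS AND PROOFS =====

-- phase i=1, j=1: the loop no longer changes ref_Files
theorem foldl_stepA_one_one (file : List (String × String))
    (l : List (List (String × String))) (refs : List (List (String × String))) :
    l.foldl (stepA file) (1, 1, refs) = (1, 1, refs) := by
  induction l with
  | nil => rfl
  | cons e rest ih =>
      simp only [List.foldl_cons, stepA]
      split_ifs <;> simp_all

-- phase i=1, j=0: the first subsequent ref is appended, then the state freezes
theorem foldl_stepA_one_zero (file : List (String × String))
    (l : List (List (String × String))) (refs : List (List (String × String))) :
    l.foldl (stepA file) (1, 0, refs) =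
      match l.filter pyIsRef with
      | a :: _ => (1, 1, refs ++ [a])
      | [] => (1, 0, refs) := by
  induction l generalizing refs with
  | nil => rfl
  | cons e rest ih =>
      simp only [List.foldl_cons, stepA, List.filter_cons]
      by_cases hr : pyIsRef e
      · simp [hr, foldl_stepA_one_one]
      · simp [hr, ih]

-- phase i=0: the third component computes B's split formula with accumulator refs0
theorem foldl_stepA_zero (file : List (String × String))
    (l : List (List (String × String))) (refs0 : List (List (String × String))) :
    (l.foldl (stepA file) (0, 0, refs0)).2.2 =
      (let pos := findPos file l
       let before := (l.take pos).filter pyIsRef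
       let after := (l.drop pos).filter pyIsRef
       let result := match before.getLast? with | some x => [x] | none => refs0
       match after with
       | a :: _ => result ++ [a]
       | [] => result) := by
  induction l generalizing refs0 with
  | nil => rfl
  | cons e rest ih =>
      by_cases he : pyDictEq e file
      · -- split point found here: i becomes 1
        by_cases hr : pyIsRef e
        · simp [List.foldl_cons, stepA, he, hr, foldl_stepA_one_one, findPos]
        · simp [List.foldl_cons, stepA, he, hr, foldl_stepA_one_zero, findPos]
          cases h : rest.filter pyIsRef <;> simp
      · -- still before the split point
        by_cases hr : pyIsRef e
        · -- e is a ref before the file: ref_Files := [e]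
          simp only [List.foldl_cons, stepA, he, hr, findPos, Bool.false_eq_true, if_false,
            show ((0:Int)==1) = false from rfl, show ((0:Int)==0) = true from rfl, if_true]
          rw [ih [e]]
          simp only [List.take_succ_cons, List.drop_succ_cons, List.filter_cons, hr, if_true]
          cases h : (rest.take (findPos file rest)).filter pyIsRef with
          | nil => simp
          | cons b t =>
              cases hg : (b :: t).getLast? with
              | none => simp at hg
              | some x => simp [hg]
        · simp [List.foldl_cons, stepA, he, hr, ih refs0, findPos]

-- ===== VERDICT (by name: the statement is the Claim_ definition above) =====
theorem find_ref_files_spec : Claim_equal_find_ref_files := by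
  intro file all_Files _ _
  unfold Spec_find_ref_files find_ref_files find_ref_files_alt
  exact foldl_stepA_zero file all_Files []
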